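-- pv_equiv track=rewrite | github.com/meannnn/MindG | llm_chunking/patterns/embedding_boundary_detector.py | _indices_to_boundaries
-- ===== SOURCE A (Python) =====
-- from typing import List, Tuple, Optional
--
-- def _indices_to_boundaries(
--
--     sentences: List[dict],
--     indices_above_thresh: List[int],
--     original_text: str
-- ) -> List[Tuple[int, int]]:
--     """
--     Convert sentence indices to character position boundaries.
--
--     Args:
--         sentences: List of sentence dicts with position info
--         indices_above_thresh: List of breakpoint indices
--         original_text: Original text for validation
--
--     Returns:
--         List of (start_pos, end_pos) tuples
--     """
--     if not sentences:
--         return []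
--
--     boundaries = []
--     start_pos = sentences[0]["start_pos"]
--
--     for index in indices_above_thresh:
--         if index < len(sentences):
--             end_pos = sentences[index]["end_pos"]
--             boundaries.append((start_pos, end_pos))
--             start_pos = end_pos
--
--     # Add final boundary
--     if start_pos < len(original_text):
--         boundaries.append((start_pos, len(original_text)))
--
--     return boundaries
-- ===== SOURCE B (Python) =====
-- def _indices_to_boundaries(sentences, indices_above_thresh, original_text):
--     if not sentences:
--         return []
--
--     def go(start, idxs):
--         if not idxs:
--             return [(start, len(original_text))] if start < len(original_text) else []
--         i, rest = idxs[0], idxs[1:]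
--         if i < len(sentences):
--             end = sentences[i]["end_pos"]
--             return [(start, end)] + go(end, rest)
--         return go(start, rest)
--
--     return go(sentences[0]["start_pos"], indices_above_thresh)
-- ===== Notes on version B (the rewrite author's own statement) =====
-- stated objective: alternative
-- what changed: B replaces A's imperative loop that appends to a boundaries list and patches the final boundary on afterwards with a recursive helper over the index list that conses each boundary onto the recursive result and emits the tail boundary in its base case.
import Mathlib
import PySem

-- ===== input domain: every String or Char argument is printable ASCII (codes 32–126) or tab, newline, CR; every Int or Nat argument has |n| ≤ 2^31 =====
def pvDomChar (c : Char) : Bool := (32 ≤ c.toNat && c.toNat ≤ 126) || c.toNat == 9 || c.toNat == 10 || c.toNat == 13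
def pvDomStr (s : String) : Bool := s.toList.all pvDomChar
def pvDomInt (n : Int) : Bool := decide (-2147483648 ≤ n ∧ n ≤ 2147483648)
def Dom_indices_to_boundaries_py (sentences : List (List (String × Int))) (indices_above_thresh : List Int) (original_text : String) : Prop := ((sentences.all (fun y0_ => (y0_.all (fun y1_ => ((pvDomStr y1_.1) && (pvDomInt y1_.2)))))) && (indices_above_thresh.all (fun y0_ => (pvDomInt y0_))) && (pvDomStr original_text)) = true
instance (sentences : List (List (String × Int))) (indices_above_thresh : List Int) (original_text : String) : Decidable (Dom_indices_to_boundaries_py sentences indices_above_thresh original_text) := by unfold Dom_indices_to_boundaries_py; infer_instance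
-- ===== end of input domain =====

-- B is a recursive decomposition: a helper conses each boundary and yields the final tail boundary in its base case, instead of A's loop appending to an accumulator plus a post-loop patch; objective: alternative (same cost).


-- dict lookup d[k] (first match, as the assoc-list convention; default 0 only reached outside Pre_)
def pvKeyD (d : List (String × Int)) (k : String) : Int :=
  ((d.find? (fun p => p.1 == k)).map Prod.snd).getD 0

-- ===== PORT A =====
def indices_to_boundaries_py (sentences : List (List (String × Int))) (indices_above_thresh : List Int) (original_text : String) : List (Int × Int) :=
  if sentences.isEmpty then [] else
  let start0 : Int := pvKeyD (sentences.headD []) "start_pos"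
  let st := indices_above_thresh.foldl
    (fun (st : List (Int × Int) × Int) index =>
      if index < (sentences.length : Int) then
        let end_pos := pvKeyD ((PySem.List.pyGet? sentences index).getD []) "end_pos"
        (st.1 ++ [(st.2, end_pos)], end_pos)
      else st)
    ([], start0)
  if st.2 < PySem.Str.len original_text then st.1 ++ [(st.2, PySem.Str.len original_text)] else st.1

-- ===== PORT B =====
-- B's recursive helper 'go': conses each boundary, emits the tail boundary in the base case.
def pvGoB (sentences : List (List (String × Int))) (original_text : String) (start : Int) : List Int → List (Int × Int)
  | [] => if start < PySem.Str.len original_text then [(start, PySem.Str.len original_text)] else []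
  | i :: rest =>
    if i < (sentences.length : Int) then
      let end_pos := pvKeyD ((PySem.List.pyGet? sentences i).getD []) "end_pos"
      (start, end_pos) :: pvGoB sentences original_text end_pos rest
    else pvGoB sentences original_text start rest

def indices_to_boundaries_py_alt (sentences : List (List (String × Int))) (indices_above_thresh : List Int) (original_text : String) : List (Int × Int) :=
  if sentences.isEmpty then [] else
  pvGoB sentences original_text (pvKeyD (sentences.headD []) "start_pos") indices_above_thresh

-- ===== PRECONDITION & SPEC =====
-- Pre_ excludes exactly the inputs on which A raises: a nonempty sentences whose first dict
-- lacks "start_pos" (KeyError), or an index i < len(sentences) that is below -len(sentences)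
-- (IndexError) or selects a dict lacking "end_pos" (KeyError).
def Pre_indices_to_boundaries_py (sentences : List (List (String × Int))) (indices_above_thresh : List Int) (original_text : String) : Prop :=
  sentences = [] ∨
    ("start_pos" ∈ (sentences.headD []).map Prod.fst ∧
     ∀ i ∈ indices_above_thresh, i < (sentences.length : Int) →
       (-(sentences.length : Int) ≤ i ∧
        "end_pos" ∈ ((PySem.List.pyGet? sentences i).getD []).map Prod.fst))
instance (sentences : List (List (String × Int))) (indices_above_thresh : List Int) (original_text : String) : Decidable (Pre_indices_to_boundaries_py sentences indices_above_thresh original_text) := by unfold Pre_indices_to_boundaries_py; infer_instance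

def pvWitness_indices_to_boundaries_py : (List (List (String × Int))) × List Int × String :=
  ([[("start_pos", 0), ("end_pos", 5)], [("start_pos", 5), ("end_pos", 9)]], [0, 1], "abcdefghij")

def Spec_indices_to_boundaries_py (sentences : List (List (String × Int))) (indices_above_thresh : List Int) (original_text : String) (out : List (Int × Int)) : Prop := out = indices_to_boundaries_py_alt sentences indices_above_thresh original_text
instance (sentences : List (List (String × Int))) (indices_above_thresh : List Int) (original_text : String) (out : List (Int × Int)) : Decidable (Spec_indices_to_boundaries_py sentences indices_above_thresh original_text out) := by unfold Spec_indices_to_boundaries_py; infer_instance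

-- ===== CLAIM (what is proved, stated in full; the proofs are below) =====
def Claim_equal_indices_to_boundaries_py : Prop := ∀ (sentences : List (List (String × Int))) (indices_above_thresh : List Int) (original_text : String), Dom_indices_to_boundaries_py sentences indices_above_thresh original_text → Pre_indices_to_boundaries_py sentences indices_above_thresh original_text → Spec_indices_to_boundaries_py sentences indices_above_thresh original_text (indices_to_boundaries_py sentences indices_above_thresh original_text)

-- ===== LEMMAS AND PROOFS =====

-- A's fold plus its post-loop patch equals B's recursion, with the accumulator factored out.
theorem foldA_eq_go (sentences : List (List (String × Int))) (original_text : String) :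
    ∀ (idxs : List Int) (bs : List (Int × Int)) (s0 : Int),
    (let st := idxs.foldl
        (fun (st : List (Int × Int) × Int) index =>
          if index < (sentences.length : Int) then
            let end_pos := pvKeyD ((PySem.List.pyGet? sentences index).getD []) "end_pos"
            (st.1 ++ [(st.2, end_pos)], end_pos)
          else st)
        (bs, s0);
     if st.2 < PySem.Str.len original_text then st.1 ++ [(st.2, PySem.Str.len original_text)] else st.1)
    = bs ++ pvGoB sentences original_text s0 idxs := by
  intro idxs
  induction idxs with
  | nil =>
    intro bs s0
    simp only [List.foldl_nil, pvGoB]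
    split_ifs <;> simp
  | cons i rest ih =>
    intro bs s0
    by_cases h : i < (sentences.length : Int)
    · simp only [List.foldl_cons, if_pos h, pvGoB]
      rw [ih]
      simp
    · simp only [List.foldl_cons, if_neg h, pvGoB]
      exact ih bs s0

-- ===== VERDICT (by name: the statement is the Claim_ definition above) =====
theorem indices_to_boundaries_py_spec : Claim_equal_indices_to_boundaries_py := by
  intro sentences indices_above_thresh original_text _ _
  unfold Spec_indices_to_boundaries_py indices_to_boundaries_py indices_to_boundaries_py_alt
  by_cases hs : sentences.isEmpty
  · simp [hs]
  · simp only [hs, Bool.false_eq_true, if_neg, not_false_iff]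
    rw [foldA_eq_go sentences original_text indices_above_thresh []]
    simp
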